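-- pv_equiv track=rewrite | github.com/gwbaik9717/Algorithm | Phython/inflearn_6-9.py | isTarget
-- ===== SOURCE A (Python) =====
-- import copy
--
-- def isTarget(arr, target):
--     stack = arr
--
--     while len(stack) > 1:
--         temp = []
--         for i in range(len(stack) - 1):
--             temp .append(stack[i] + stack[i+1])
--         stack = copy.deepcopy(temp)
--
--     if stack[0] == target:
--         return True
--     return False
-- ===== SOURCE B (Python) =====
-- def isTarget(arr, target):
--     # closed form: repeated adjacent-sum collapse gives sum of C(n-1,i)*arr[i],
--     # computed in one pass with incremental binomial coefficients
--     n = len(arr)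
--     total = 0
--     c = 1
--     for i, x in enumerate(arr):
--         total += c * x
--         c = c * (n - 1 - i) // (i + 1)
--     return total == target
-- ===== Notes on version B (the rewrite author's own statement) =====
-- stated objective: faster
-- what changed: Replaced the repeated adjacent-sum collapse loop with a single pass computing sum(C(n-1,i)*arr[i]) via incrementally updated binomial coefficients.
import Mathlib
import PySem

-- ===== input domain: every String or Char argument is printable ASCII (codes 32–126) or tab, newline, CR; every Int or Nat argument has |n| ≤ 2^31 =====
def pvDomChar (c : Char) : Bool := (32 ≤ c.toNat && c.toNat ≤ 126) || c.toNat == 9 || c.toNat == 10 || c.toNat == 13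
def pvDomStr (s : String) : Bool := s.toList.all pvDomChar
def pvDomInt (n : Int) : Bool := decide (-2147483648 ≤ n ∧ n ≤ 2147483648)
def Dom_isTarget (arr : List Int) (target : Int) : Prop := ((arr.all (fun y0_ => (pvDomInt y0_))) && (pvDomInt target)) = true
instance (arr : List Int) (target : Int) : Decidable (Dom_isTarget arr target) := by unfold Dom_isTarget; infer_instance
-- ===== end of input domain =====

-- B replaces A's quadratic repeated adjacent-sum collapse by one linear pass summing
-- C(n-1,i)*arr[i] with incrementally updated binomial coefficients (objective: faster).

-- ===== PORT A =====
-- inner for-loop: temp of pairwise adjacent sums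
def adjStep : List Int → List Int
  | a :: b :: rest => (a + b) :: adjStep (b :: rest)
  | _ => []

theorem adjStep_length : ∀ (s : List Int), (adjStep s).length = s.length - 1
  | [] => rfl
  | [_] => rfl
  | _ :: b :: rest => by simp [adjStep, adjStep_length (b :: rest)]

-- the while-loop: repeat until one element remains
def collapse (s : List Int) : List Int :=
  if _h : s.length > 1 then collapse (adjStep s) else s
termination_by s.length
decreasing_by simp [adjStep_length]; omega

def isTarget (arr : List Int) (target : Int) : Bool :=
  match collapse arr with
  | x :: _ => x == target      -- stack[0] == target
  | [] => false                -- Python raises IndexError here; excluded by Pre_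

-- ===== PORT B =====
def isTarget_alt (arr : List Int) (target : Int) : Bool :=
  (arr.zipIdx.foldl
    (fun (tc : Int × Int) (p : Int × Nat) =>
      (tc.1 + tc.2 * p.1,
        PySem.Int.floordiv (tc.2 * ((arr.length : Int) - 1 - (p.2 : Int))) ((p.2 : Int) + 1)))
    (0, 1)).1 == target

-- ===== PRECONDITION & SPEC =====
-- A raises IndexError (stack[0]) on the empty list; Pre_ excludes exactly that input.
def Pre_isTarget (arr : List Int) (_target : Int) : Prop := arr ≠ []
instance (arr : List Int) (target : Int) : Decidable (Pre_isTarget arr target) := by unfold Pre_isTarget; infer_instance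
def pvWitness_isTarget : List Int × Int := ([1, 2, 3], 8)

def Spec_isTarget (arr : List Int) (target : Int) (out : Bool) : Prop := out = isTarget_alt arr target
instance (arr : List Int) (target : Int) (out : Bool) : Decidable (Spec_isTarget arr target out) := by unfold Spec_isTarget; infer_instance

-- ===== CLAIM (what is proved, stated in full; the proofs are below) =====
def Claim_equal_isTarget : Prop := ∀ (arr : List Int) (target : Int), Dom_isTarget arr target → Pre_isTarget arr target → Spec_isTarget arr target (isTarget arr target)

-- ===== LEMMAS AND PROOFS =====

-- the binomial-weighted sum of a list (weights C(len-1, i))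
def bsum (s : List Int) : Int :=
  ∑ i ∈ Finset.range s.length, ((s.length - 1).choose i : Int) * s.getD i 0

theorem adjStep_getD (s : List Int) (i : Nat) (h : i < s.length - 1) :
    (adjStep s).getD i 0 = s.getD i 0 + s.getD (i + 1) 0 := by
  induction s generalizing i with
  | nil => simp at h
  | cons a t ih =>
    match t, i with
    | [], _ => simp at h
    | b :: r, 0 => simp [adjStep]
    | b :: r, i + 1 =>
      simp only [adjStep, List.getD_cons_succ]
      exact ih i (by simp at h ⊢; omega)

theorem bsum_adjStep (s : List Int) (h : 2 ≤ s.length) : bsum (adjStep s) = bsum s := by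
  obtain ⟨m, hm⟩ : ∃ m, s.length = m + 2 := ⟨s.length - 2, by omega⟩
  unfold bsum
  rw [adjStep_length, hm]
  have hlen1 : m + 2 - 1 = m + 1 := by omega
  have hlen2 : m + 1 - 1 = m := by omega
  rw [hlen1, hlen2]
  -- rewrite LHS summand via adjStep_getD
  rw [Finset.sum_congr rfl (fun i hi => by
    rw [adjStep_getD s i (by rw [hm]; simp at hi ⊢; omega)])]
  -- RHS: peel index 0, Pascal on the rest
  rw [Finset.sum_range_succ' (fun i => ((m + 1).choose i : Int) * s.getD i 0) (m + 1)]
  have pascal : ∀ i, ((m + 1).choose (i + 1) : Int) = (m.choose i : Int) + (m.choose (i + 1) : Int) := by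
    intro i; exact_mod_cast congrArg (Nat.cast (R := Int)) (Nat.choose_succ_succ m i)
  calc ∑ i ∈ Finset.range (m + 1), (m.choose i : Int) * (s.getD i 0 + s.getD (i + 1) 0)
      = (∑ i ∈ Finset.range (m + 1), (m.choose i : Int) * s.getD i 0)
        + ∑ i ∈ Finset.range (m + 1), (m.choose i : Int) * s.getD (i + 1) 0 := by
        rw [← Finset.sum_add_distrib]; apply Finset.sum_congr rfl; intro i _; ring
    _ = ((∑ i ∈ Finset.range m, (m.choose (i + 1) : Int) * s.getD (i + 1) 0) + s.getD 0 0)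
        + ∑ i ∈ Finset.range (m + 1), (m.choose i : Int) * s.getD (i + 1) 0 := by
        rw [Finset.sum_range_succ' (fun i => (m.choose i : Int) * s.getD i 0) m]
        simp
    _ = ((∑ i ∈ Finset.range (m + 1), (m.choose (i + 1) : Int) * s.getD (i + 1) 0) + s.getD 0 0)
        + ∑ i ∈ Finset.range (m + 1), (m.choose i : Int) * s.getD (i + 1) 0 := by
        rw [Finset.sum_range_succ (fun i => (m.choose (i + 1) : Int) * s.getD (i + 1) 0) m]
        simp
    _ = (∑ i ∈ Finset.range (m + 1), ((m + 1).choose (i + 1) : Int) * s.getD (i + 1) 0)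
        + s.getD 0 0 := by
        have h3 : ∑ i ∈ Finset.range (m + 1), ((m + 1).choose (i + 1) : Int) * s.getD (i + 1) 0
            = ∑ i ∈ Finset.range (m + 1),
                ((m.choose i : Int) * s.getD (i + 1) 0 + (m.choose (i + 1) : Int) * s.getD (i + 1) 0) := by
          apply Finset.sum_congr rfl; intro i _; rw [pascal i]; ring
        rw [h3, Finset.sum_add_distrib]; ring
    _ = _ := by simp

theorem collapse_head : ∀ (s : List Int), s ≠ [] →
    ∃ rest, collapse s = bsum s :: rest := by
  intro s hs
  induction hn : s.length using Nat.strong_induction_on generalizing s with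
  | _ n ih =>
    rw [collapse]
    split
    · next h =>
      have h2 : 2 ≤ s.length := h
      have hne : adjStep s ≠ [] := by
        intro he; have := adjStep_length s; rw [he] at this; simp at this; omega
      obtain ⟨rest, hr⟩ := ih (adjStep s).length (by rw [adjStep_length]; omega) (adjStep s) hne rfl
      exact ⟨rest, by rw [hr, bsum_adjStep s h2]⟩
    · next h =>
      match s, hs with
      | [a], _ => exact ⟨[], by simp [bsum]⟩
      | a :: b :: r, _ => simp at h

-- g m k l = ∑ C(m-1, k+i) * l[i] : the tail sum maintained by B's fold
def gsum (m k : Nat) : List Int → Int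
  | [] => 0
  | x :: xs => ((m - 1).choose k : Int) * x + gsum m (k + 1) xs

theorem floordiv_exact (q b : Int) (hb : 0 < b) : PySem.Int.floordiv (q * b) b = q := by
  rw [PySem.Int.floordiv_eq_ediv_of_pos hb, Int.mul_ediv_cancel _ (by omega)]

theorem choose_step (m k : Nat) (hk : k < m) :
    PySem.Int.floordiv (((m - 1).choose k : Int) * ((m : Int) - 1 - (k : Int))) ((k : Int) + 1)
      = ((m - 1).choose (k + 1) : Int) := by
  have h1 : ((m : Int) - 1 - (k : Int)) = ((m - 1 - k : Nat) : Int) := by omega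
  have h2 : ((m - 1).choose k : Int) * ((m - 1 - k : Nat) : Int)
      = ((m - 1).choose (k + 1) : Int) * ((k : Int) + 1) := by
    have := Nat.choose_succ_right_eq (m - 1) k
    exact_mod_cast congrArg (Nat.cast (R := Int)) this.symm
  rw [h1, h2, floordiv_exact _ _ (by omega)]

theorem fold_inv (m : Nat) : ∀ (l : List Int) (k : Nat) (total : Int), k + l.length = m →
    ((l.zipIdx k).foldl
      (fun (tc : Int × Int) (p : Int × Nat) =>
        (tc.1 + tc.2 * p.1, PySem.Int.floordiv (tc.2 * ((m : Int) - 1 - (p.2 : Int))) ((p.2 : Int) + 1)))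
      (total, ((m - 1).choose k : Int))).1 = total + gsum m k l := by
  intro l
  induction l with
  | nil => intro k total _; simp [gsum]
  | cons x xs ih =>
    intro k total hk
    have hkm : k < m := by simp at hk; omega
    simp only [List.zipIdx_cons, List.foldl_cons, gsum]
    rw [choose_step m k hkm, ih (k + 1) (total + ((m - 1).choose k : Int) * x) (by simp at hk ⊢; omega)]
    ring

theorem gsum_eq (m : Nat) : ∀ (l : List Int) (k : Nat),
    gsum m k l = ∑ i ∈ Finset.range l.length, ((m - 1).choose (k + i) : Int) * l.getD i 0 := by
  intro l
  induction l with
  | nil => simp [gsum]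
  | cons x xs ih =>
    intro k
    rw [gsum, ih (k + 1), show (x :: xs).length = xs.length + 1 from rfl,
      Finset.sum_range_succ' (fun i => ((m - 1).choose (k + i) : Int) * (x :: xs).getD i 0) xs.length]
    simp only [List.getD_cons_succ, List.getD_cons_zero]
    have hc : ∑ i ∈ Finset.range xs.length, ((m - 1).choose (k + (i + 1)) : Int) * xs.getD i 0
        = ∑ i ∈ Finset.range xs.length, ((m - 1).choose (k + 1 + i) : Int) * xs.getD i 0 := by
      apply Finset.sum_congr rfl; intro i _
      rw [show k + (i + 1) = k + 1 + i from by omega]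
    rw [hc]
    simp only [Nat.add_zero]
    ring

theorem gsum_bsum (l : List Int) : gsum l.length 0 l = bsum l := by
  rw [gsum_eq, bsum]; simp

-- ===== VERDICT (by name: the statement is the Claim_ definition above) =====
theorem isTarget_spec : Claim_equal_isTarget := by
  intro arr target _ hpre
  obtain ⟨rest, hr⟩ := collapse_head arr hpre
  have hf := fold_inv arr.length arr 0 0 (by simp)
  simp only [Nat.choose_zero_right, Nat.cast_one] at hf
  unfold Spec_isTarget isTarget isTarget_alt
  rw [hr, hf, gsum_bsum, zero_add]
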